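-- pv_equiv track=rewrite | github.com/adherent-ls/deep_learning | vocab/radical/generate_word_radical_map.py | radical_split
-- ===== SOURCE A (Python) =====
-- def radical_split(word, radical_map):
--     if word not in radical_map:
--         return [word]
--     if len(radical_map[word]) == 1:
--         return radical_map[word]
--
--     radicals = radical_map[word]
--     new_radicals = []
--     for item in radicals:
--         v = radical_split(item, radical_map)
--         new_radicals.extend(v)
--     return new_radicals
-- ===== SOURCE B (Python) =====
-- def radical_split(word, radical_map):
--     # Iterative explicit-stack DFS instead of recursion; same leaf order as A.
--     out = []
--     stack = [word]
--     while stack: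
--         w = stack.pop()
--         if w not in radical_map:
--             out.append(w)
--         else:
--             rs = radical_map[w]
--             if len(rs) == 1:
--                 out.extend(rs)
--             else:
--                 stack.extend(reversed(rs))
--     return out
-- ===== Notes on version B (the rewrite author's own statement) =====
-- stated objective: alternative
-- what changed: Replaces A's recursive tree expansion with an iterative explicit-stack DFS that appends leaves to one output list (no recursion, no repeated list extends of recursive results).
import Mathlib
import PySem

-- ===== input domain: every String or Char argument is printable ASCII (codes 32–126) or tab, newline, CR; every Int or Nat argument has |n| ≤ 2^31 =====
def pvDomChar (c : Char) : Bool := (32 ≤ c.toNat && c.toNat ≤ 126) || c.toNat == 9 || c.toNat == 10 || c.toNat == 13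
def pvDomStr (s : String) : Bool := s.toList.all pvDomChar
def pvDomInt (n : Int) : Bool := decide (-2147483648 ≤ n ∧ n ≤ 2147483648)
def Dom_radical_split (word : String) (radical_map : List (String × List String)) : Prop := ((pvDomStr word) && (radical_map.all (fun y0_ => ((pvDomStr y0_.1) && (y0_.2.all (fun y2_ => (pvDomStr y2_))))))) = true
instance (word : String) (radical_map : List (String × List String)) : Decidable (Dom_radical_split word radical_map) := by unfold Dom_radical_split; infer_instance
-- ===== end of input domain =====

-- B replaces A's recursion with an iterative explicit-stack DFS producing the same leaf list (alternative decomposition, same cost).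


-- ===== PORT A =====
-- A's recursion, guarded by a depth fuel that only makes it total: on inputs
-- satisfying Pre_ (no reachable cycle) the recursion depth is < radical_map.length + 1,
-- so the fuel-0 fallback is never reached.
def goA (rm : List (String × List String)) : Nat → String → List String
  | 0, w => [w]
  | f + 1, w =>
    match (PySem.Dict.mk rm).get? w with
    | none => [w]                              -- if word not in radical_map: return [word]
    | some radicals =>
      if radicals.length = 1 then radicals     -- if len(radical_map[word]) == 1: return radical_map[word]
      else radicals.foldl (fun acc item => acc ++ goA rm f item) []   -- for item: new_radicals.extend(radical_split(item, radical_map))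

def radical_split (word : String) (radical_map : List (String × List String)) : List String :=
  goA radical_map (radical_map.length + 1) word

-- ===== PORT B =====
-- A size bound on one word's expansion tree at bounded depth; used only as the
-- termination measure / fuel bookkeeping of B's stack loop.
def treeSize (rm : List (String × List String)) : Nat → String → Nat
  | 0, _ => 1
  | f + 1, w =>
    match (PySem.Dict.mk rm).get? w with
    | none => 1
    | some l => if l.length = 1 then 1 else 1 + (l.map (treeSize rm f)).sum

theorem treeSize_pos (rm : List (String × List String)) (f : Nat) (w : String) :
    0 < treeSize rm f w := by
  cases f with
  | zero => exact Nat.one_pos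
  | succ f =>
    rw [treeSize]
    cases h : (PySem.Dict.mk rm).get? w with
    | none => exact Nat.one_pos
    | some l =>
      dsimp only
      split <;> omega

-- B's while loop: stack of pending words (head = top of stack), leaves appended to out.
-- Each stack entry carries the remaining depth fuel purely as a totality guard;
-- it is never exhausted on inputs where the Python loop terminates.
def loopB (rm : List (String × List String)) : List (Nat × String) → List String
  | [] => []
  | (f, w) :: rest =>
    match f with
    | 0 => w :: loopB rm rest                  -- fuel guard (unreachable under Pre_)
    | f' + 1 =>
      match hl : (PySem.Dict.mk rm).get? w with
      | none => w :: loopB rm rest             -- if w not in radical_map: out.append(w)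
      | some rs =>
        if rs.length = 1 then rs ++ loopB rm rest          -- out.extend(rs)
        else loopB rm (rs.map (fun c => (f', c)) ++ rest)  -- stack.extend(reversed(rs))
termination_by stack => (stack.map (fun p => treeSize rm p.1 p.2)).sum
decreasing_by
  all_goals simp only [List.map_cons, List.sum_cons, Nat.succ_eq_add_one]
  · have := treeSize_pos rm 0 w
    omega
  · have := treeSize_pos rm (f' + 1) w
    omega
  · have := treeSize_pos rm (f' + 1) w
    omega
  · rename_i hne
    simp only [List.map_append, List.map_map, List.sum_append, Function.comp_def]
    have hT : treeSize rm (f' + 1) w = 1 + (rs.map (treeSize rm f')).sum := by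
      rw [treeSize, hl]
      dsimp only
      rw [if_neg hne]
    rw [show (List.map (fun c => treeSize rm f' c) rs) = List.map (treeSize rm f') rs from rfl,
      hT]
    omega

def radical_split_alt (word : String) (radical_map : List (String × List String)) : List String :=
  loopB radical_map [(radical_map.length + 1, word)]

-- ===== PRECONDITION & SPEC =====
-- Successors along which A actually recurses (keys whose list has length ≠ 1).
def succs (rm : List (String × List String)) (w : String) : List String :=
  match (PySem.Dict.mk rm).get? w with
  | none => []
  | some l => if l.length = 1 then [] else l

-- All nodes reachable from ws in at most n steps.
def reachB (rm : List (String × List String)) : Nat → List String → List String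
  | 0, ws => ws
  | n + 1, ws => reachB rm n ((ws ++ ws.flatMap (succs rm)).dedup)

-- Pre_ excludes exactly the inputs on which Python A raises (RecursionError on an
-- expansion cycle reachable from word): no node reachable from word lies on a cycle.
def Pre_radical_split (word : String) (radical_map : List (String × List String)) : Prop :=
  ∀ k ∈ reachB radical_map (radical_map.length + 1) [word],
    k ∉ reachB radical_map (radical_map.length + 1) (succs radical_map k)
instance (word : String) (radical_map : List (String × List String)) : Decidable (Pre_radical_split word radical_map) := by unfold Pre_radical_split; infer_instance

def pvWitness_radical_split : String × (List (String × List String)) :=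
  ("a", [("a", ["b", "c"]), ("b", ["x", "y"])])

def Spec_radical_split (word : String) (radical_map : List (String × List String)) (out : List String) : Prop := out = radical_split_alt word radical_map
instance (word : String) (radical_map : List (String × List String)) (out : List String) : Decidable (Spec_radical_split word radical_map out) := by unfold Spec_radical_split; infer_instance

-- ===== CLAIM (what is proved, stated in full; the proofs are below) =====
def Claim_equal_radical_split : Prop := ∀ (word : String) (radical_map : List (String × List String)), Dom_radical_split word radical_map → Pre_radical_split word radical_map → Spec_radical_split word radical_map (radical_split word radical_map)

-- ===== LEMMAS AND PROOFS =====

theorem loopB_nil (rm : List (String × List String)) : loopB rm [] = [] := by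
  rw [loopB]

-- One stack step of B performs exactly one recursive expansion of A.
theorem loopB_step (rm : List (String × List String)) :
    ∀ (f : Nat) (w : String) (rest : List (Nat × String)),
      loopB rm ((f, w) :: rest) = goA rm f w ++ loopB rm rest := by
  intro f
  induction f with
  | zero => intro w rest; simp [loopB, goA]
  | succ f ih =>
    have happ : ∀ (l : List String) (rest : List (Nat × String)),
        loopB rm (l.map (fun c => (f, c)) ++ rest)
          = l.foldl (fun acc item => acc ++ goA rm f item) [] ++ loopB rm rest := by
      intro l
      induction l with
      | nil => intro rest; simp
      | cons x xs ihx =>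
        intro rest
        have hfold : ∀ (init : List String),
            (x :: xs).foldl (fun acc item => acc ++ goA rm f item) init
              = init ++ goA rm f x ++ xs.foldl (fun acc item => acc ++ goA rm f item) [] := by
          intro init
          simp only [List.foldl_cons]
          rw [PySem.List.foldl_append_eq_flatMap, PySem.List.foldl_append_eq_flatMap]
          simp
        simp only [List.map_cons, List.cons_append]
        rw [ih, ihx, hfold []]
        simp
    intro w rest
    rw [loopB]
    cases hl : (PySem.Dict.mk rm).get? w with
    | none => simp [goA, hl]
    | some rs =>
      by_cases h1 : rs.length = 1
      · simp [goA, hl, h1]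
      · simp only [goA, hl, h1, if_false]
        rw [happ]

-- ===== VERDICT (by name: the statement is the Claim_ definition above) =====
theorem radical_split_spec : Claim_equal_radical_split := by
  intro word rm _ _
  unfold Spec_radical_split radical_split radical_split_alt
  rw [loopB_step, loopB_nil, List.append_nil]
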